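-- pv_equiv track=rewrite | github.com/DrFaustus1/back_web | disproga.py | select_branching_pair
-- ===== SOURCE A (Python) =====
-- def select_branching_pair(matrix):
--     n = len(matrix)
--     max_theta = -1
--     best_pair = None
--
--     for i in range(n):
--         for j in range(n):
--             if matrix[i][j] == 0:
--                 # Вычисляем alpha_i
--                 row = matrix[i]
--                 alpha = min(val for idx, val in enumerate(row) if idx != j)
--                 # Вычисляем beta_j
--                 col = [matrix[k][j] for k in range(n)]
--                 beta = min(val for idx, val in enumerate(col) if idx != i)
--                 theta = alpha + beta
--                 if theta > max_theta:
--                     max_theta = theta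
--                     best_pair = (i, j)
--
--     return best_pair, max_theta
-- ===== SOURCE B (Python) =====
-- def select_branching_pair(matrix):
--     n = len(matrix)
--
--     def two_smallest(vals):
--         # (smallest value, second-smallest value, index of first smallest)
--         m1 = m2 = None
--         k = -1
--         for idx, v in enumerate(vals):
--             if m1 is None or v < m1:
--                 m2 = m1
--                 m1 = v
--                 k = idx
--             elif m2 is None or v < m2:
--                 m2 = v
--         return m1, m2, k
--
--     rows = [two_smallest(row) for row in matrix]
--     cols = [two_smallest([matrix[k][j] for k in range(n)]) for j in range(n)]
--
--     best_pair, max_theta = None, -1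
--     for i in range(n):
--         row = matrix[i]
--         for j in range(n):
--             if row[j] == 0:
--                 m1, m2, k = rows[i]
--                 alpha = m2 if k == j else m1
--                 c1, c2, ck = cols[j]
--                 beta = c2 if ck == i else c1
--                 theta = alpha + beta
--                 if theta > max_theta:
--                     max_theta, best_pair = theta, (i, j)
--     return best_pair, max_theta
-- ===== Notes on version B (the rewrite author's own statement) =====
-- stated objective: alternative
-- what changed: Instead of rebuilding the column and recomputing the excluded row/column minima for every zero cell, B precomputes for each row and each column its two smallest values and the index of the first minimum, and answers each zero cell from those tables.
import Mathlib
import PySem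

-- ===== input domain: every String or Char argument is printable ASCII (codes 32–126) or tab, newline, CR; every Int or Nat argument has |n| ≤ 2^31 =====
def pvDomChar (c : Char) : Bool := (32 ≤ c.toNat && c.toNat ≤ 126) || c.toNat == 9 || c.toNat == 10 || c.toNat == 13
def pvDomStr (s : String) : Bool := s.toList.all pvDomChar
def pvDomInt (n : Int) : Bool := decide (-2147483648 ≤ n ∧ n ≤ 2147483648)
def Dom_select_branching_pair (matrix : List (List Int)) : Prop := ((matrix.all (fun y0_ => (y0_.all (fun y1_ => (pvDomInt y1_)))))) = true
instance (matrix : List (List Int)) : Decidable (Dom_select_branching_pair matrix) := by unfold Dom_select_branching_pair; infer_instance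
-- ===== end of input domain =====

-- B replaces A's per-zero recomputation of the excluded row/column minima by a single
-- precomputation of each row's and column's two smallest values and first argmin.

-- ===== PORT A =====
-- Python's `min(val for idx, val in enumerate(xs) if idx != j)`; none = ValueError (excluded by Pre_)
def pyMinExcl (l : List Int) (j : Int) : Option Int :=
  PySem.List.min? (((PySem.List.enumerate l 0).filter (fun p => p.1 != j)).map (fun p => p.2)) (fun y => y)

-- literal port of A; matrix[i] / matrix[i][j] are in range under Pre_, so the getD defaults never fire
def select_branching_pair (matrix : List (List Int)) : (Option (Int × Int)) × Int :=
  let n := matrix.length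
  (List.range n).foldl (fun acc i =>
    (List.range n).foldl (fun acc j =>
      let row := matrix.getD i []
      if row.getD j 1 = 0 then
        let alpha := (pyMinExcl row (j : Int)).getD 0
        let col := (List.range n).map (fun k => (matrix.getD k []).getD j 0)
        let beta := (pyMinExcl col (i : Int)).getD 0
        let theta := alpha + beta
        if acc.2 < theta then (some ((i : Int), (j : Int)), theta) else acc
      else acc) acc) (none, -1)

-- ===== PORT B =====
-- B's two_smallest: one pass computing (smallest, second smallest, index of first smallest)
def twoSmallest (vals : List Int) : Option Int × Option Int × Int :=
  (PySem.List.enumerate vals 0).foldl (fun acc p =>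
    match acc with
    | (none, m2, _) => (some p.2, m2, p.1)
    | (some a, m2, k) =>
      if p.2 < a then (some p.2, some a, p.1)
      else match m2 with
        | none => (some a, some p.2, k)
        | some b => if p.2 < b then (some a, some p.2, k) else (some a, some b, k))
    (none, none, -1)

def select_branching_pair_alt (matrix : List (List Int)) : (Option (Int × Int)) × Int :=
  let n := matrix.length
  let rows := matrix.map twoSmallest
  let cols := (List.range n).map (fun j =>
    twoSmallest ((List.range n).map (fun k => (matrix.getD k []).getD j 0)))
  (List.range n).foldl (fun acc i =>
    let row := matrix.getD i []
    (List.range n).foldl (fun acc j =>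
      if row.getD j 1 = 0 then
        let r := rows.getD i (none, none, -1)
        let alpha := (if r.2.2 = (j : Int) then r.2.1 else r.1).getD 0
        let c := cols.getD j (none, none, -1)
        let beta := (if c.2.2 = (i : Int) then c.2.1 else c.1).getD 0
        let theta := alpha + beta
        if acc.2 < theta then (some ((i : Int), (j : Int)), theta) else acc
      else acc) acc) (none, -1)

-- ===== PRECONDITION & SPEC =====
-- Pre_ excludes exactly the inputs where the Python A raises: a row shorter than len(matrix)
-- (IndexError) and the 1×1 matrix [[0]] shape (min() of an empty sequence, ValueError).
def Pre_select_branching_pair (matrix : List (List Int)) : Prop :=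
  (∀ row ∈ matrix, matrix.length ≤ row.length) ∧
  ¬ (matrix.length = 1 ∧ (matrix.headD []).headD 1 = 0)
instance (matrix : List (List Int)) : Decidable (Pre_select_branching_pair matrix) := by
  unfold Pre_select_branching_pair; infer_instance

def pvWitness_select_branching_pair : List (List Int) := [[0, 1], [2, 0]]

def Spec_select_branching_pair (matrix : List (List Int)) (out : (Option (Int × Int)) × Int) : Prop := out = select_branching_pair_alt matrix
instance (matrix : List (List Int)) (out : (Option (Int × Int)) × Int) : Decidable (Spec_select_branching_pair matrix out) := by unfold Spec_select_branching_pair; infer_instance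

-- ===== CLAIM (what is proved, stated in full; the proofs are below) =====
def Claim_equal_select_branching_pair : Prop := ∀ (matrix : List (List Int)), Dom_select_branching_pair matrix → Pre_select_branching_pair matrix → Spec_select_branching_pair matrix (select_branching_pair matrix)

-- ===== LEMMAS AND PROOFS =====

-- Python min of an int list is the minimum value
theorem pymin_id (l : List Int) : PySem.List.min? l (fun y => y) = l.min? := by
  cases l with
  | nil => simp [PySem.List.min?]
  | cons x t => simp [PySem.List.min?_id_cons, List.min?]

-- dropping index j from an enumerated list is eraseIdx
theorem filter_enumerate_eraseIdx (l : List Int) (s : Int) (j : Nat) :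
    j < l.length →
    ((PySem.List.enumerate l s).filter (fun p => p.1 != s + (j : Int))).map (fun p => p.2)
      = l.eraseIdx j := by
  induction l generalizing s j with
  | nil => simp
  | cons x t ih =>
    intro hj
    rw [PySem.List.enumerate_cons]
    cases j with
    | zero =>
      simp only [List.filter_cons]
      rw [show (s != s + ((0 : Nat) : Int)) = false from by simp]
      simp only [Bool.false_eq_true, if_false]
      have : (PySem.List.enumerate t (s + 1)).filter (fun p => p.1 != s + ((0 : Nat) : Int))
          = PySem.List.enumerate t (s + 1) := by
        apply List.filter_eq_self.mpr
        intro p hp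
        rcases (PySem.List.mem_enumerate_iff t (s + 1) p).1 hp with ⟨k, hk, rfl⟩
        simp only [bne_iff_ne, ne_eq]
        omega
      rw [this, PySem.List.map_snd_enumerate]
      simp
    | succ m =>
      simp only [List.filter_cons]
      rw [show (s != s + ((m + 1 : Nat) : Int)) = true from by
        simp only [bne_iff_ne, ne_eq]; push_cast; omega]
      simp only [if_true]
      simp only [List.map_cons, List.eraseIdx_cons_succ]
      have harg : (fun p : Int × Int => p.1 != s + ((m + 1 : Nat) : Int))
          = (fun p : Int × Int => p.1 != (s + 1) + ((m : Nat) : Int)) := by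
        funext p; congr 1; push_cast; ring
      rw [harg, ih (s + 1) m (by simpa using hj)]

-- min? over a snoc
theorem min?_snoc (x v : Int) (t : List Int) :
    (x :: t ++ [v]).min? = some (min ((x :: t).min?.getD 0) v) := by
  simp [List.min?, List.foldl_append]

-- characterisation of B's one-pass scan: smallest value, min with the first argmin removed, first argmin
theorem twoSmallest_spec (l : List Int) (h : l ≠ []) :
    twoSmallest l = (l.min?,
      (l.eraseIdx (List.idxOf (l.min?.getD 0) l)).min?,
      ((List.idxOf (l.min?.getD 0) l : Nat) : Int)) := by
  induction l using List.reverseRecOn with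
  | nil => exact absurd rfl h
  | append_singleton l v ih =>
    rcases List.eq_nil_or_concat' l with rfl | hne
    · simp [twoSmallest, PySem.List.enumerate_cons, List.min?]
    · have hl : l ≠ [] := by rcases hne with ⟨l', x, rfl⟩; simp
      obtain ⟨a, ha⟩ : ∃ a, l.min? = some a := by
        rcases l with _ | ⟨x, t⟩
        · exact absurd rfl hl
        · exact ⟨_, rfl⟩
      have hmem : a ∈ l := List.min?_mem ha
      have hle : ∀ b ∈ l, a ≤ b := ((List.min?_eq_some_iff).1 ha).2
      have hts : twoSmallest (l ++ [v]) =
          (fun acc (p : Int × Int) =>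
            match acc with
            | (none, m2, _) => (some p.2, m2, p.1)
            | (some a, m2, k) =>
              if p.2 < a then (some p.2, some a, p.1)
              else match m2 with
                | none => (some a, some p.2, k)
                | some b => if p.2 < b then (some a, some p.2, k) else (some a, some b, k))
            (twoSmallest l) ((l.length : Int), v) := by
        simp [twoSmallest, PySem.List.enumerate_append, PySem.List.enumerate_cons, List.foldl_append]
      rw [hts, ih hl, ha]
      simp only [Option.getD_some]
      have hkm : List.idxOf a l < l.length := List.idxOf_lt_length_of_mem hmem
      by_cases hv : v < a
      · -- v is the new unique minimum, at index l.length
        have hvnot : v ∉ l := fun hmv => absurd (hle v hmv) (by omega)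
        have hmin : (l ++ [v]).min? = some v := by
          rcases l with _ | ⟨x, t⟩
          · exact absurd rfl hl
          · rw [min?_snoc, ha]
            simp [min_eq_right (le_of_lt hv)]
        have hidx : List.idxOf v (l ++ [v]) = l.length := by
          rw [List.idxOf_append]
          simp [hvnot, List.idxOf_cons_self]
        have herase : (l ++ [v]).eraseIdx l.length = l := by
          rw [List.eraseIdx_append_of_length_le (le_refl _)]
          simp
        rw [hmin]
        simp only [Option.getD_some, hidx, herase, ha]
        simp [hv]
      · -- the old minimum survives; v only competes for second place
        have hmin : (l ++ [v]).min? = some a := by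
          rcases l with _ | ⟨x, t⟩
          · exact absurd rfl hl
          · rw [min?_snoc, ha]
            simp [min_eq_left (not_lt.mp hv)]
        have hidx : List.idxOf a (l ++ [v]) = List.idxOf a l := by
          rw [List.idxOf_append]; simp [hmem]
        have herase : (l ++ [v]).eraseIdx (List.idxOf a l)
            = l.eraseIdx (List.idxOf a l) ++ [v] := List.eraseIdx_append_of_lt_length hkm _
        rw [hmin]
        simp only [Option.getD_some, hidx, herase]
        rcases he : (l.eraseIdx (List.idxOf a l)).min? with _ | b
        · -- the erased list is empty (l is a singleton)
          have : l.eraseIdx (List.idxOf a l) = [] := List.min?_eq_none_iff.1 he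
          rw [this]
          simp [hv, List.min?]
        · obtain ⟨x, t, hxt⟩ : ∃ x t, l.eraseIdx (List.idxOf a l) = x :: t := by
            rcases hE : l.eraseIdx (List.idxOf a l) with _ | ⟨x, t⟩
            · rw [hE] at he; simp [List.min?] at he
            · exact ⟨x, t, rfl⟩
          rw [hxt] at he ⊢
          rw [min?_snoc, he]
          simp only [Option.getD_some, hv, if_false]
          by_cases hvb : v < b
          · simp [min_eq_right (le_of_lt hvb), hvb]
          · simp [min_eq_left (by omega : b ≤ v), hvb]

-- removing a non-argmin index keeps the minimum
theorem min?_eraseIdx_ne (l : List Int) (a : Int) (j : Nat)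
    (ha : l.min? = some a) (hne : j ≠ List.idxOf a l) :
    (l.eraseIdx j).min? = some a := by
  have hmem : a ∈ l := List.min?_mem ha
  have hle : ∀ b ∈ l, a ≤ b := ((List.min?_eq_some_iff).1 ha).2
  have hkm : List.idxOf a l < l.length := List.idxOf_lt_length_of_mem hmem
  apply (List.min?_eq_some_iff).2
  constructor
  · exact List.mem_eraseIdx_iff_getElem.2 ⟨List.idxOf a l, hkm, fun h => hne h.symm,
      List.getElem_idxOf hkm⟩
  · intro b hb
    exact hle b (List.mem_of_mem_eraseIdx hb)

-- the bridge: B's table lookup equals A's recomputed excluded minimum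
theorem alpha_bridge (l : List Int) (j : Nat) (hj : j < l.length) :
    (if (twoSmallest l).2.2 = (j : Int) then (twoSmallest l).2.1 else (twoSmallest l).1).getD 0
      = (pyMinExcl l (j : Int)).getD 0 := by
  have hl : l ≠ [] := by intro h; subst h; simp at hj
  have hfe := filter_enumerate_eraseIdx l 0 j hj
  simp only [zero_add] at hfe
  rw [pyMinExcl, pymin_id, hfe, twoSmallest_spec l hl]
  obtain ⟨a, ha⟩ : ∃ a, l.min? = some a := by
    rcases l with _ | ⟨x, t⟩
    · exact absurd rfl hl
    · exact ⟨_, rfl⟩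
  rw [ha]
  simp only [Option.getD_some]
  by_cases hk : j = List.idxOf a l
  · subst hk; simp
  · have : ¬ ((List.idxOf a l : Int) = (j : Int)) := by
      intro h; exact hk (by exact_mod_cast h.symm)
    rw [if_neg this, min?_eraseIdx_ne l a j ha hk]

-- getD on the mapped precomputations
theorem rows_getD (matrix : List (List Int)) (i : Nat) (hi : i < matrix.length) :
    (matrix.map twoSmallest).getD i (none, none, -1) = twoSmallest (matrix.getD i []) := by
  rw [List.getD_eq_getElem _ _ (by simpa using hi), List.getElem_map,
    List.getD_eq_getElem _ _ hi]

theorem cols_getD (n : Nat) (f : Nat → List Int) (j : Nat) (hj : j < n) :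
    ((List.range n).map (fun j => twoSmallest (f j))).getD j (none, none, -1)
      = twoSmallest (f j) := by
  rw [List.getD_eq_getElem _ _ (by simpa using hj), List.getElem_map, List.getElem_range]

-- ===== VERDICT (by name: the statement is the Claim_ definition above) =====
theorem select_branching_pair_spec : Claim_equal_select_branching_pair := by
  intro matrix _ hpre
  obtain ⟨hrow, hone⟩ := hpre
  unfold Spec_select_branching_pair select_branching_pair select_branching_pair_alt
  simp only []
  apply (PySem.List.foldl_congr_mem _ _ _ _ ?_).symm
  intro acc i hi
  have hi' : i < matrix.length := List.mem_range.1 hi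
  apply PySem.List.foldl_congr_mem
  intro acc j hj
  have hj' : j < matrix.length := List.mem_range.1 hj
  show _ = _
  by_cases hz : (matrix.getD i []).getD j 1 = 0
  · rw [if_pos hz, if_pos hz]
    -- the zero cell forces matrix.length ≥ 2 under Pre_
    have hrlen : matrix.length ≤ (matrix.getD i []).length := by
      apply hrow
      rw [List.getD_eq_getElem _ _ hi']
      exact List.getElem_mem hi'
    have h2 : 2 ≤ matrix.length := by
      by_contra h
      have hn1 : matrix.length = 1 := by omega
      have hi0 : i = 0 := by omega
      have hj0 : j = 0 := by omega
      apply hone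
      refine ⟨hn1, ?_⟩
      subst hi0 hj0
      rcases matrix with _ | ⟨r, rest⟩
      · simp at hn1
      · rcases r with _ | ⟨x, xs⟩
        · simp at hrlen
        · simpa using hz
    have halpha := alpha_bridge (matrix.getD i []) j (by omega)
    have hcollen : ((List.range matrix.length).map
        (fun k => (matrix.getD k []).getD j 0)).length = matrix.length := by simp
    have hbeta := alpha_bridge ((List.range matrix.length).map
        (fun k => (matrix.getD k []).getD j 0)) i (by rw [hcollen]; omega)
    rw [rows_getD matrix i hi', cols_getD matrix.length
      (fun j' => (List.range matrix.length).map (fun k => (matrix.getD k []).getD j' 0)) j hj']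
    rw [halpha, hbeta]
  · rw [if_neg hz, if_neg hz]
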